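-- pv_equiv track=rewrite | github.com/Lihong062/CS101 | APTs/Final APT/NotTogether.py | check
-- ===== SOURCE A (Python) =====
-- def check(phrase, let1, let2):
--     '''
--     phrase is a string of words, let1
--     and let2 are both strings of a single
--     letter.
--
--     Returns in sorted order, a String
--     of the words from phrase that
--     that have both let1 and let2 in them,
--     each at least once, but do not have the
--     two letters adjacent.
--     '''
--
--     phrase = phrase.split()
--     ret = []
--
--     if let1 != let2:
--         for word in phrase:
--             if let1 in word and let2 in word:
--                 ret.append(word)
--             for i in range(len(word)-1):
--                 if let1 in [word[i],word[i+1]] and let2 in [word[i],word[i+1]]: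
--                     try:
--                         ret.remove(word)
--                     except:
--                         pass
--     elif let1 == let2:
--         for word in phrase:
--             if word.count(let1) >= 2:
--                 ret.append(word)
--             for i in range(len(word)-1):
--                 if [let1,let1] == [word[i],word[i+1]]:
--                     try:
--                         ret.remove(word)
--                     except:
--                         pass
--
--     return ' '.join(sorted(ret))
-- ===== SOURCE B (Python) =====
-- def check(phrase, let1, let2):
--     # One boolean per word (no append/remove bookkeeping): a word stays iff it
--     # has both letters (count>=2 when they coincide) and no adjacent character
--     # pair contains both letters; then filter once, sort and join.
--     if let1 != let2:
--         keep = lambda w: (let1 in w and let2 in w and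
--                           not any(let1 in p and let2 in p for p in zip(w, w[1:])))
--     else:
--         keep = lambda w: (w.count(let1) >= 2 and
--                           not any(p == (let1, let1) for p in zip(w, w[1:])))
--     return ' '.join(sorted(filter(keep, phrase.split())))
-- ===== Notes on version B (the rewrite author's own statement) =====
-- stated objective: simpler
-- what changed: A appends each candidate word to the result and then scans every adjacent index pair, undoing the append via try ret.remove(word) (a linear rescan of the result per hit); B computes one boolean per word (both letters present, or count>=2 when they coincide, and no adjacent character pair via zip(w, w[1:]) containing both letters) and filters once, then sorts and joins.
import Mathlib
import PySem

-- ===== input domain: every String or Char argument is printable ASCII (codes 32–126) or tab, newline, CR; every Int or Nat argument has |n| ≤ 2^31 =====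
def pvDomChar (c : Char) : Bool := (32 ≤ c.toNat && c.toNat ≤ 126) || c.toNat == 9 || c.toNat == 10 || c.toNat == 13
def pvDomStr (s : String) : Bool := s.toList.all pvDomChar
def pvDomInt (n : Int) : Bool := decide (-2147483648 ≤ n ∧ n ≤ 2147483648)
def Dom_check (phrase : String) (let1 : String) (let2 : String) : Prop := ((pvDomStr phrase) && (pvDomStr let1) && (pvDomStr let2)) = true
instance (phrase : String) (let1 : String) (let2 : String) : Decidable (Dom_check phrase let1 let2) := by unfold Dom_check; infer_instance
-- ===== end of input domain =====

-- B replaces A's append / pair-scan / try-remove bookkeeping by one boolean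
-- predicate per word and a single filter; objective: simpler.

-- ===== PORT A =====
-- Python `let1 == word[i]` where word[i] is the 1-character string at index i
-- (exact: string equality against a single character; the none case is never
-- reached, the loop keeps i and i+1 in range).
def pvStrEqGet (l : String) (o : Option Char) : Bool :=
  match o with
  | some c => l.toList == [c]
  | none => false

def check (phrase : String) (let1 : String) (let2 : String) : String :=
  let words := PySem.Str.split₀ phrase
  let ret : List String :=
    if let1 ≠ let2 then
      words.foldl (fun ret word =>
        (PySem.List.pyRange 0 (PySem.Str.len word - 1) 1).foldl (fun r i =>
          if (pvStrEqGet let1 (PySem.Str.pyGet? word i) || pvStrEqGet let1 (PySem.Str.pyGet? word (i+1))) &&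
             (pvStrEqGet let2 (PySem.Str.pyGet? word i) || pvStrEqGet let2 (PySem.Str.pyGet? word (i+1)))
          then (PySem.List.remove? r word).getD r   -- try: ret.remove(word) / except: pass
          else r)
          (if PySem.Str.isIn let1 word && PySem.Str.isIn let2 word then ret ++ [word] else ret)) []
    else
      words.foldl (fun ret word =>
        (PySem.List.pyRange 0 (PySem.Str.len word - 1) 1).foldl (fun r i =>
          if pvStrEqGet let1 (PySem.Str.pyGet? word i) && pvStrEqGet let1 (PySem.Str.pyGet? word (i+1))
          then (PySem.List.remove? r word).getD r
          else r)
          (if 2 ≤ PySem.Str.count word let1 then ret ++ [word] else ret)) []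
  PySem.Str.join " " (PySem.List.sorted ret (fun w => w) false)

-- ===== PORT B =====
-- Python `let1 == c` for a character c of the word (tuple membership / equality)
def pvStrEqChar (l : String) (c : Char) : Bool := l.toList == [c]

def check_alt (phrase : String) (let1 : String) (let2 : String) : String :=
  let keep : String → Bool :=
    if let1 ≠ let2 then
      fun w => PySem.Str.isIn let1 w && PySem.Str.isIn let2 w &&
        !((w.toList.zip (PySem.Str.slice w (some 1) none).toList).any (fun p =>
            (pvStrEqChar let1 p.1 || pvStrEqChar let1 p.2) &&
            (pvStrEqChar let2 p.1 || pvStrEqChar let2 p.2)))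
    else
      fun w => decide (2 ≤ PySem.Str.count w let1) &&
        !((w.toList.zip (PySem.Str.slice w (some 1) none).toList).any (fun p =>
            pvStrEqChar let1 p.1 && pvStrEqChar let1 p.2))
  PySem.Str.join " " (PySem.List.sorted ((PySem.Str.split₀ phrase).filter keep) (fun w => w) false)

-- ===== PRECONDITION & SPEC =====
def Spec_check (phrase : String) (let1 : String) (let2 : String) (out : String) : Prop := out = check_alt phrase let1 let2
instance (phrase : String) (let1 : String) (let2 : String) (out : String) : Decidable (Spec_check phrase let1 let2 out) := by unfold Spec_check; infer_instance

-- ===== CLAIM (what is proved, stated in full; the proofs are below) =====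
def Claim_equal_check : Prop := ∀ (phrase : String) (let1 : String) (let2 : String), Dom_check phrase let1 let2 → Spec_check phrase let1 let2 (check phrase let1 let2)

-- ===== LEMMAS AND PROOFS =====

-- w.count(c) with a single-character needle counts characters
theorem count_go_singleton (c : Char) (cs : List Char) :
    ∀ (fuel acc : Nat), cs.length ≤ fuel →
      PySem.Chars.count.go [c] fuel cs acc = acc + cs.count c := by
  induction cs with
  | nil => intro fuel acc _; rw [PySem.Chars.count.go.eq_def]; cases fuel <;> simp
  | cons y t ih =>
    intro fuel acc hf
    cases fuel with
    | zero => simp at hf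
    | succ f =>
      rw [PySem.Chars.count.go.eq_def]
      have hpre : ([c].isPrefixOf (y :: t) : Bool) = (c == y) := by
        simp [List.isPrefixOf]
      simp only [hpre, List.count_cons, List.length_cons] at *
      by_cases hx : c = y
      · subst hx
        simp only [BEq.rfl, if_true, List.length_nil, Nat.zero_add, List.drop_succ_cons,
          List.drop_zero]
        rw [ih f (acc+1) (by omega)]
        omega
      · have hb : (c == y) = false := by simp [hx]
        simp only [hb, Bool.false_eq_true, if_false]
        rw [ih f acc (by omega)]
        simp [Ne.symm hx]

theorem count_singleton (cs : List Char) (c : Char) :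
    PySem.Chars.count cs [c] = cs.count c := by
  simp [PySem.Chars.count, count_go_singleton c cs cs.length 0 le_rfl]

theorem remove_getD_of_not_mem (r : List String) (w : String) (h : w ∉ r) :
    (PySem.List.remove? r w).getD r = r := by
  rw [(PySem.List.remove?_eq_none_iff r w).mpr h]; rfl

-- the try/remove inner loop removes at most the single tracked copy of w
theorem inner_loop (cond : Int → Bool) (w : String) :
    ∀ (is : List Int) (ret : List String), (is.any cond = true → ret.count w ≤ 1) →
      is.foldl (fun r i => if cond i then (PySem.List.remove? r w).getD r else r) ret
        = if is.any cond then (PySem.List.remove? ret w).getD ret else ret := by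
  intro is
  induction is with
  | nil => intro ret _; simp
  | cons i it ih =>
    intro ret hcnt
    simp only [List.foldl_cons, List.any_cons]
    by_cases hc : cond i = true
    · simp only [hc, Bool.true_or, if_true]
      set ret' := (PySem.List.remove? ret w).getD ret with hret'
      have hno : w ∉ ret' := by
        have h1 : ret.count w ≤ 1 := hcnt (by simp [hc])
        by_cases hm : w ∈ ret
        · rw [hret', PySem.List.remove?_eq_some_erase ret w hm]
          intro hmem
          simp only [Option.getD_some] at hmem
          have hce : (ret.erase w).count w = ret.count w - 1 := List.count_erase_self
          have hpos := List.count_pos_iff.mpr hmem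
          omega
        · rw [hret', (PySem.List.remove?_eq_none_iff ret w).mpr hm]
          simpa using hm
      rw [ih ret' (fun _ => by simp [List.count_eq_zero_of_not_mem hno])]
      rw [remove_getD_of_not_mem ret' w hno]
      split <;> rfl
    · simp only [Bool.not_eq_true] at hc
      simp only [hc, Bool.false_or]
      exact ih ret (fun h => hcnt (by simp [h]))

theorem pair_prefix_iff (a b : Char) (l : List Char) :
    [a, b] <+: l ↔ (l[0]? = some a ∧ l[1]? = some b) := by
  cases l with
  | nil => simp
  | cons x t => cases t with
    | nil => simp [List.prefix_cons_iff]
    | cons y u => simp [List.cons_prefix_cons, eq_comm]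

-- a two-character pattern is an infix exactly when it sits at adjacent indices
theorem pair_infix_iff (a b : Char) (cs : List Char) :
    [a, b] <:+: cs ↔ ∃ j : Nat, cs[j]? = some a ∧ cs[j+1]? = some b := by
  constructor
  · intro h
    obtain ⟨j, hj⟩ := ((PySem.Chars.exists_prefix_drop_iff_isIn [a,b] cs).mpr
      ((PySem.Chars.isIn_iff_infix [a,b] cs).mpr h))
    have := (pair_prefix_iff a b _).mp hj
    rw [List.getElem?_drop, List.getElem?_drop] at this
    exact ⟨j, by simpa using this.1, by simpa using this.2⟩
  · rintro ⟨j, h1, h2⟩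
    refine (PySem.Chars.isIn_iff_infix [a,b] cs).mp
      ((PySem.Chars.exists_prefix_drop_iff_isIn [a,b] cs).mp ⟨j, ?_⟩)
    rw [pair_prefix_iff, List.getElem?_drop, List.getElem?_drop]
    exact ⟨by simpa using h1, by simpa using h2⟩

theorem single_infix_isIn (l : String) (c : Char) (h : l.toList = [c]) (w : String) :
    PySem.Str.isIn l w = true ↔ c ∈ w.toList := by
  rw [PySem.Str.isIn_iff_infix, h, List.singleton_infix_iff]

theorem any_pyRange_len_iff (w : String) (p : Int → Bool) :
    (PySem.List.pyRange 0 (PySem.Str.len w - 1) 1).any p = true ↔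
      ∃ j : Nat, j + 1 < w.toList.length ∧ p (j : Int) = true := by
  rw [List.any_eq_true]
  constructor
  · rintro ⟨i, hmem, hp⟩
    rw [PySem.List.mem_pyRange_one] at hmem
    obtain ⟨h0, hlt⟩ := hmem
    refine ⟨i.toNat, ?_, ?_⟩
    · rw [PySem.Str.len_eq] at hlt; omega
    · rwa [Int.toNat_of_nonneg h0]
  · rintro ⟨j, hj, hp⟩
    refine ⟨(j : Int), ?_, hp⟩
    rw [PySem.List.mem_pyRange_one, PySem.Str.len_eq]
    omega

theorem cast_succ (j : Nat) : ((j : Int) + 1) = ((j + 1 : Nat) : Int) := by push_cast; ring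

-- w[1:] as a character list
theorem slice_one_toList (w : String) :
    (PySem.Str.slice w (some 1) none).toList = w.toList.drop 1 := by
  simp [pysem]

-- B's scan of zip(w, w[1:]) ranges over exactly the adjacent index pairs
theorem any_zip_iff (cs : List Char) (q : Char × Char → Bool) :
    ((cs.zip (cs.drop 1)).any q = true) ↔
      ∃ j : Nat, ∃ a b, cs[j]? = some a ∧ cs[j+1]? = some b ∧ q (a, b) = true := by
  rw [List.any_eq_true]
  constructor
  · rintro ⟨p, hmem, hq⟩
    rw [List.mem_iff_getElem] at hmem
    obtain ⟨j, hlen, hje⟩ := hmem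
    have hj : j + 1 < cs.length := by
      simp only [List.length_zip, List.length_drop] at hlen; omega
    refine ⟨j, cs[j], cs[j+1], List.getElem?_eq_getElem (by omega),
      List.getElem?_eq_getElem hj, ?_⟩
    have hd : (cs.drop 1)[j]'(by simp; omega) = cs[j+1] := by
      rw [List.getElem_drop]; congr 1; omega
    rw [List.getElem_zip, hd] at hje
    rw [hje]; exact hq
  · rintro ⟨j, a, b, ha, hb, hq⟩
    have hj : j + 1 < cs.length := (List.getElem?_eq_some_iff.mp hb).1
    refine ⟨(a, b), ?_, hq⟩
    rw [List.mem_iff_getElem]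
    refine ⟨j, by simp only [List.length_zip, List.length_drop]; omega, ?_⟩
    rw [List.getElem_zip]
    have hd : (cs.drop 1)[j]'(by simp; omega) = cs[j+1] := by
      rw [List.getElem_drop]; congr 1; omega
    have ha' : cs[j] = a := by
      have := List.getElem?_eq_getElem (l := cs) (show j < cs.length by omega)
      rw [ha] at this; exact (Option.some.injEq _ _ ▸ this.symm :)
    have hb' : cs[j+1] = b := by
      have := List.getElem?_eq_getElem (l := cs) hj
      rw [hb] at this; exact (Option.some.injEq _ _ ▸ this.symm :)
    rw [hd, ha', hb']

-- A's index scan and B's zip scan test the same pairs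
theorem any_idx_eq_any_zip (w : String) (pq : Option Char → Option Char → Bool)
    (q : Char × Char → Bool) (hpq : ∀ a b, pq (some a) (some b) = q (a, b)) :
    ((PySem.List.pyRange 0 (PySem.Str.len w - 1) 1).any (fun i =>
        pq (PySem.Str.pyGet? w i) (PySem.Str.pyGet? w (i+1))))
    = ((w.toList.zip (w.toList.drop 1)).any q) := by
  rw [Bool.eq_iff_iff, any_pyRange_len_iff, any_zip_iff]
  constructor
  · rintro ⟨j, hj, hp⟩
    rw [cast_succ] at hp
    simp only [PySem.Str.pyGet?_natCast] at hp
    rw [List.getElem?_eq_getElem (show j < w.toList.length by omega),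
      List.getElem?_eq_getElem hj, hpq] at hp
    exact ⟨j, w.toList[j], w.toList[j+1],
      List.getElem?_eq_getElem (by omega), List.getElem?_eq_getElem hj, hp⟩
  · rintro ⟨j, a, b, ha, hb, hq⟩
    have hj : j + 1 < w.toList.length := (List.getElem?_eq_some_iff.mp hb).1
    refine ⟨j, hj, ?_⟩
    rw [cast_succ]
    simp only [PySem.Str.pyGet?_natCast]
    rw [ha, hb, hpq]
    exact hq

-- an adjacency hit forces both membership tests of the append condition
theorem zip_imp_app_distinct (l1 l2 w : String)
    (h : ((w.toList.zip (w.toList.drop 1)).any (fun p =>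
        (pvStrEqChar l1 p.1 || pvStrEqChar l1 p.2) &&
        (pvStrEqChar l2 p.1 || pvStrEqChar l2 p.2))) = true) :
    (PySem.Str.isIn l1 w && PySem.Str.isIn l2 w) = true := by
  rw [List.any_eq_true] at h
  obtain ⟨p, hmem, hq⟩ := h
  have hp1 : p.1 ∈ w.toList := (List.of_mem_zip hmem).1
  have hp2 : p.2 ∈ w.toList := List.mem_of_mem_drop (List.of_mem_zip hmem).2
  rw [Bool.and_eq_true, Bool.or_eq_true, Bool.or_eq_true] at hq
  rw [Bool.and_eq_true]
  obtain ⟨h1, h2⟩ := hq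
  constructor
  · rcases h1 with h1 | h1 <;>
      [exact (single_infix_isIn l1 p.1 (by simpa [pvStrEqChar] using h1) w).mpr hp1;
       exact (single_infix_isIn l1 p.2 (by simpa [pvStrEqChar] using h1) w).mpr hp2]
  · rcases h2 with h2 | h2 <;>
      [exact (single_infix_isIn l2 p.1 (by simpa [pvStrEqChar] using h2) w).mpr hp1;
       exact (single_infix_isIn l2 p.2 (by simpa [pvStrEqChar] using h2) w).mpr hp2]

theorem zip_imp_app_equal (l1 w : String)
    (h : ((w.toList.zip (w.toList.drop 1)).any (fun p =>
        pvStrEqChar l1 p.1 && pvStrEqChar l1 p.2)) = true) :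
    2 ≤ PySem.Str.count w l1 := by
  rw [any_zip_iff] at h
  obtain ⟨j, a, b, ha, hb, hq⟩ := h
  rw [Bool.and_eq_true] at hq
  have h1 : l1.toList = [a] := by simpa [pvStrEqChar] using hq.1
  have h2 : l1.toList = [b] := by simpa [pvStrEqChar] using hq.2
  have hab : b = a := by
    have := h2.symm.trans h1; simpa using this
  subst hab
  have hinf : [b, b] <:+: w.toList := (pair_infix_iff b b w.toList).mpr ⟨j, ha, hb⟩
  have hcnt : ([b, b] : List Char).count b ≤ w.toList.count b := hinf.sublist.count_le b
  simp only [List.count_cons_self, List.count_nil] at hcnt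
  rw [PySem.Str.count_eq, h1, count_singleton]
  omega

-- the whole append / pair-scan / try-remove loop builds exactly the filter
theorem outer_loop (app : String → Prop) [DecidablePred app] (cond : String → Int → Bool)
    (rng : String → List Int) (keep : String → Bool)
    (hkeep : ∀ w, keep w = (decide (app w) && !((rng w).any (cond w))))
    (himp : ∀ w, (rng w).any (cond w) = true → app w) :
    ∀ (ws ret : List String), (∀ x ∈ ret, keep x = true) →
      ws.foldl (fun ret w =>
        (rng w).foldl (fun r i => if cond w i then (PySem.List.remove? r w).getD r else r)
          (if app w then ret ++ [w] else ret)) ret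
      = ret ++ ws.filter keep := by
  intro ws
  induction ws with
  | nil => intro ret _; simp
  | cons w ws ih =>
    intro ret hret
    simp only [List.foldl_cons, List.filter_cons]
    by_cases hany : (rng w).any (cond w) = true
    · have happ : app w := himp w hany
      have hkw : keep w = false := by rw [hkeep w, hany]; simp
      have hwnot : w ∉ ret := fun hm => by simp [hret w hm] at hkw
      rw [if_pos happ,
        inner_loop (cond w) w (rng w) (ret ++ [w])
          (fun _ => by rw [List.count_append]; simp [List.count_eq_zero_of_not_mem hwnot]),
        hany, if_pos rfl,
        PySem.List.remove?_eq_some_erase _ w (by simp)]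
      simp only [Option.getD_some]
      rw [List.erase_append_right _ hwnot]
      simp only [List.erase_cons_head, List.append_nil, hkw, Bool.false_eq_true, if_false]
      exact ih ret hret
    · have hnone : (rng w).any (cond w) = false := by simpa using hany
      rw [inner_loop (cond w) w (rng w) _ (fun h => absurd h (by simp [hnone])), hnone]
      simp only [Bool.false_eq_true, if_false]
      by_cases happ : app w
      · have hkw : keep w = true := by rw [hkeep w, hnone]; simp [happ]
        rw [if_pos happ, hkw, if_pos rfl]
        rw [ih (ret ++ [w]) (by intro x hx; rcases List.mem_append.mp hx with h | h
                                · exact hret x h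
                                · simpa [List.mem_singleton.mp h] using hkw)]
        simp
      · have hkw : keep w = false := by rw [hkeep w, hnone]; simp [happ]
        rw [if_neg happ, hkw]
        simp only [Bool.false_eq_true, if_false]
        exact ih ret hret

-- ===== VERDICT (by name: the statement is the Claim_ definition above) =====
theorem check_spec : Claim_equal_check := by
  intro phrase l1 l2 _
  unfold Spec_check check check_alt
  by_cases heq : l1 = l2
  · subst heq
    simp only [ne_eq]
    rw [if_neg (fun h => h trivial), if_neg (fun h => h trivial)]
    have hk : ∀ w : String,
        (decide (2 ≤ PySem.Str.count w l1) &&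
          !((w.toList.zip (PySem.Str.slice w (some 1) none).toList).any (fun p =>
              pvStrEqChar l1 p.1 && pvStrEqChar l1 p.2)))
        = (decide (2 ≤ PySem.Str.count w l1) &&
          !((PySem.List.pyRange 0 (PySem.Str.len w - 1) 1).any (fun i =>
              pvStrEqGet l1 (PySem.Str.pyGet? w i) &&
              pvStrEqGet l1 (PySem.Str.pyGet? w (i+1))))) := by
      intro w
      rw [slice_one_toList,
        any_idx_eq_any_zip w
          (fun o1 o2 => pvStrEqGet l1 o1 && pvStrEqGet l1 o2)
          (fun p => pvStrEqChar l1 p.1 && pvStrEqChar l1 p.2) (fun a b => rfl)]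
    have hi : ∀ w : String,
        ((PySem.List.pyRange 0 (PySem.Str.len w - 1) 1).any (fun i =>
            pvStrEqGet l1 (PySem.Str.pyGet? w i) &&
            pvStrEqGet l1 (PySem.Str.pyGet? w (i+1)))) = true →
        2 ≤ PySem.Str.count w l1 := by
      intro w h
      rw [any_idx_eq_any_zip w
        (fun o1 o2 => pvStrEqGet l1 o1 && pvStrEqGet l1 o2)
        (fun p => pvStrEqChar l1 p.1 && pvStrEqChar l1 p.2) (fun a b => rfl)] at h
      exact zip_imp_app_equal l1 w h
    rw [outer_loop (fun w => 2 ≤ PySem.Str.count w l1)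
      (fun w i => pvStrEqGet l1 (PySem.Str.pyGet? w i) && pvStrEqGet l1 (PySem.Str.pyGet? w (i+1)))
      (fun w => PySem.List.pyRange 0 (PySem.Str.len w - 1) 1)
      (fun w => decide (2 ≤ PySem.Str.count w l1) &&
        !((w.toList.zip (PySem.Str.slice w (some 1) none).toList).any (fun p =>
            pvStrEqChar l1 p.1 && pvStrEqChar l1 p.2)))
      hk hi (PySem.Str.split₀ phrase) [] (by simp)]
    rfl
  · simp only [ne_eq]
    rw [if_pos heq, if_pos heq]
    have hk : ∀ w : String,
        (PySem.Str.isIn l1 w && PySem.Str.isIn l2 w &&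
          !((w.toList.zip (PySem.Str.slice w (some 1) none).toList).any (fun p =>
              (pvStrEqChar l1 p.1 || pvStrEqChar l1 p.2) &&
              (pvStrEqChar l2 p.1 || pvStrEqChar l2 p.2))))
        = (decide ((PySem.Str.isIn l1 w && PySem.Str.isIn l2 w) = true) &&
          !((PySem.List.pyRange 0 (PySem.Str.len w - 1) 1).any (fun i =>
              (pvStrEqGet l1 (PySem.Str.pyGet? w i) || pvStrEqGet l1 (PySem.Str.pyGet? w (i+1))) &&
              (pvStrEqGet l2 (PySem.Str.pyGet? w i) || pvStrEqGet l2 (PySem.Str.pyGet? w (i+1)))))) := by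
      intro w
      rw [slice_one_toList,
        any_idx_eq_any_zip w
          (fun o1 o2 => (pvStrEqGet l1 o1 || pvStrEqGet l1 o2) &&
                        (pvStrEqGet l2 o1 || pvStrEqGet l2 o2))
          (fun p => (pvStrEqChar l1 p.1 || pvStrEqChar l1 p.2) &&
                    (pvStrEqChar l2 p.1 || pvStrEqChar l2 p.2)) (fun a b => rfl),
        Bool.decide_coe]
    have hi : ∀ w : String,
        ((PySem.List.pyRange 0 (PySem.Str.len w - 1) 1).any (fun i =>
            (pvStrEqGet l1 (PySem.Str.pyGet? w i) || pvStrEqGet l1 (PySem.Str.pyGet? w (i+1))) &&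
            (pvStrEqGet l2 (PySem.Str.pyGet? w i) || pvStrEqGet l2 (PySem.Str.pyGet? w (i+1))))) = true →
        (PySem.Str.isIn l1 w && PySem.Str.isIn l2 w) = true := by
      intro w h
      rw [any_idx_eq_any_zip w
        (fun o1 o2 => (pvStrEqGet l1 o1 || pvStrEqGet l1 o2) &&
                      (pvStrEqGet l2 o1 || pvStrEqGet l2 o2))
        (fun p => (pvStrEqChar l1 p.1 || pvStrEqChar l1 p.2) &&
                  (pvStrEqChar l2 p.1 || pvStrEqChar l2 p.2)) (fun a b => rfl)] at h
      exact zip_imp_app_distinct l1 l2 w h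
    rw [outer_loop (fun w => (PySem.Str.isIn l1 w && PySem.Str.isIn l2 w) = true)
      (fun w i =>
        (pvStrEqGet l1 (PySem.Str.pyGet? w i) || pvStrEqGet l1 (PySem.Str.pyGet? w (i+1))) &&
        (pvStrEqGet l2 (PySem.Str.pyGet? w i) || pvStrEqGet l2 (PySem.Str.pyGet? w (i+1))))
      (fun w => PySem.List.pyRange 0 (PySem.Str.len w - 1) 1)
      (fun w => PySem.Str.isIn l1 w && PySem.Str.isIn l2 w &&
        !((w.toList.zip (PySem.Str.slice w (some 1) none).toList).any (fun p =>
            (pvStrEqChar l1 p.1 || pvStrEqChar l1 p.2) &&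
            (pvStrEqChar l2 p.1 || pvStrEqChar l2 p.2))))
      hk hi (PySem.Str.split₀ phrase) [] (by simp)]
    rfl
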